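-- pv_equiv track=rewrite | github.com/RideGreg/LeetCode | Python/jump-game-iv.py | minJumps_kamyu
-- ===== SOURCE A (Python) =====
-- import collections
--
-- def minJumps_kamyu(arr):
--     groups = collections.defaultdict(list)
--     for i, x in enumerate(arr):
--         groups[x].append(i)
--     q = collections.deque([(0, 0)])
--     lookup = {0}
--     while q:
--         pos, step = q.popleft()
--         if pos == len(arr)-1:
--             break
--         neighbors = set(groups[arr[pos]] + [pos-1, pos+1])
--         groups[arr[pos]] = []
--         for p in neighbors:
--             if p not in lookup and 0 <= p < len(arr):
--                 lookup.add(p)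
--                 q.append((p, step+1))
--     return step
-- ===== SOURCE B (Python) =====
-- def minJumps_kamyu(arr):
--     n = len(arr)
--     frontier = {0}
--     remaining = list(range(1, n))
--     used = set()
--     step = 0
--     while frontier:
--         if n - 1 in frontier:
--             return step
--         vals = {arr[p] for p in frontier} - used
--         used |= vals
--         nf = set()
--         rest = []
--         for i in remaining:
--             if i - 1 in frontier or i + 1 in frontier or arr[i] in vals:
--                 nf.add(i)
--             else:
--                 rest.append(i)
--         frontier, remaining = nf, rest
--         step += 1
--     return step
-- ===== Notes on version B (the rewrite author's own statement) =====
-- stated objective: alternative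
-- what changed: Replaces A's deque-based BFS with a precomputed value->indices dict and group clearing by round-synchronous label propagation: no queue and no groups dict at all; each round scans the list of still-unvisited indices and admits those adjacent to the frontier (index +-1 or a shared value not in a used-values set).
-- outside the precondition, e.g. on minJumps_kamyu([]): A raises IndexError, B raises IndexError
import Mathlib
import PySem

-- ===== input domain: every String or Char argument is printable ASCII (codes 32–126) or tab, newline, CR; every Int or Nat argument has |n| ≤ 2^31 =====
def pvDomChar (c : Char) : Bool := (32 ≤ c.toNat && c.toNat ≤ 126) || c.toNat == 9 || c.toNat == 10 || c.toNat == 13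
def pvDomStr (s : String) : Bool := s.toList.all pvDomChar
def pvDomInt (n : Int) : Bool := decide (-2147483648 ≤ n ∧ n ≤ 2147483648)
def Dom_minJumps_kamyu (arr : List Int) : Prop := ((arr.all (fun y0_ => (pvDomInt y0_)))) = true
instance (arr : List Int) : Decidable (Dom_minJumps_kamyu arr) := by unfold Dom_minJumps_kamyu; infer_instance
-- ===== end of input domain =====

-- B replaces A's queue-plus-value-groups BFS by round-synchronous label propagation: each
-- round scans the still-unvisited indices and admits those adjacent (index ±1 or shared value)
-- to the frontier, with a used-values set instead of group clearing (objective: alternative).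

-- ===== PORT A =====
-- groups = defaultdict(list); for i, x in enumerate(arr): groups[x].append(i)
def pvGroupsA (arr : List Int) : PySem.Dict Int (List Int) :=
  (PySem.List.enumerate arr).foldl
    (fun d ix => d.insert ix.2 (d.getD ix.2 [] ++ [ix.1])) PySem.Dict.empty

-- body of 'for p in neighbors: if p not in lookup and 0 <= p < len(arr): …', state (q, lookup)
def pvStepA (arr : List Int) (step : Int) (s : List (Int × Int) × PySem.Set Int) (p : Int) :
    List (Int × Int) × PySem.Set Int :=
  if p ∉ s.2 ∧ 0 ≤ p ∧ p < (arr.length : Int) then (s.1 ++ [(p, step + 1)], PySem.Set.add s.2 p)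
  else s

-- 'while q: pos, step = q.popleft(); …'; the last parameter is the current value of 'step'
def pvLoopA (arr : List Int) :
    Nat → List (Int × Int) → PySem.Set Int → PySem.Dict Int (List Int) → Int → Int
  | 0, _, _, _, st => st
  | _ + 1, [], _, _, st => st
  | f + 1, (pos, step) :: q, lookup, groups, _ =>
    if pos = (arr.length : Int) - 1 then step
    else
      match PySem.List.pyGet? arr pos with
      | none => pvLoopA arr f q lookup groups step  -- arr[pos] IndexError (only for arr = []); outside Pre_
      | some x =>
        let neighbors := PySem.Set.ofList (groups.getD x [] ++ [pos - 1, pos + 1])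
        let groups' := groups.insert x []
        let s := neighbors.foldl (pvStepA arr step) (q, lookup)
        pvLoopA arr f s.1 s.2 groups' step

def minJumps_kamyu (arr : List Int) : Int :=
  pvLoopA arr arr.length [((0 : Int), (0 : Int))] (PySem.Set.add PySem.Set.empty 0)
    (pvGroupsA arr) 0

-- ===== PORT B =====
-- vals_all = {arr[p] for p in frontier}  (IndexError = none is skipped: frontier always holds
-- in-range indices when arr ≠ []; for arr = [] Python raises, outside Pre_)
def pvValsC (arr : List Int) (frontier : PySem.Set Int) : PySem.Set Int :=
  frontier.foldl
    (fun s p => match PySem.List.pyGet? arr p with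
      | some x => PySem.Set.add s x
      | none => s) PySem.Set.empty

-- 'i - 1 in frontier or i + 1 in frontier or arr[i] in vals'
def pvCondC (arr : List Int) (frontier vals : PySem.Set Int) (i : Int) : Bool :=
  decide ((i - 1) ∈ frontier) || decide ((i + 1) ∈ frontier) ||
    (match PySem.List.pyGet? arr i with
     | some x => decide (x ∈ vals)
     | none => false)  -- arr[i] IndexError: unreachable, remaining ⊆ range(n)

-- body of 'for i in remaining: …', state (nf, rest)
def pvScanC (arr : List Int) (frontier vals : PySem.Set Int) (s : PySem.Set Int × List Int)
    (i : Int) : PySem.Set Int × List Int :=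
  if pvCondC arr frontier vals i then (PySem.Set.add s.1 i, s.2) else (s.1, s.2 ++ [i])

-- 'while frontier: if n-1 in frontier: return step; …'
def pvLoopC (arr : List Int) :
    Nat → PySem.Set Int → List Int → PySem.Set Int → Int → Int
  | 0, _, _, _, step => step
  | f + 1, frontier, remaining, used, step =>
    if frontier = [] then step
    else if ((arr.length : Int) - 1) ∈ frontier then step
    else
      let vals := PySem.Set.diff (pvValsC arr frontier) used
      let used' := PySem.Set.update used vals
      let s := remaining.foldl (pvScanC arr frontier vals) (PySem.Set.empty, [])
      pvLoopC arr f s.1 s.2 used' (step + 1)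

def minJumps_kamyu_alt (arr : List Int) : Int :=
  pvLoopC arr arr.length (PySem.Set.add PySem.Set.empty 0)
    (PySem.List.pyRange 1 (arr.length : Int) 1) PySem.Set.empty 0

-- ===== PRECONDITION & SPEC =====
-- Pre_ excludes only arr = [], on which Python A raises IndexError (arr[0]).
def Pre_minJumps_kamyu (arr : List Int) : Prop := arr ≠ []
instance (arr : List Int) : Decidable (Pre_minJumps_kamyu arr) := by
  unfold Pre_minJumps_kamyu; infer_instance

def pvWitness_minJumps_kamyu : List Int := [7, 6, 9, 6, 9, 7]

def Spec_minJumps_kamyu (arr : List Int) (out : Int) : Prop := out = minJumps_kamyu_alt arr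
instance (arr : List Int) (out : Int) : Decidable (Spec_minJumps_kamyu arr out) := by
  unfold Spec_minJumps_kamyu; infer_instance

-- ===== CLAIM (what is proved, stated in full; the proofs are below) =====
def Claim_equal_minJumps_kamyu : Prop :=
  ∀ (arr : List Int), Dom_minJumps_kamyu arr → Pre_minJumps_kamyu arr →
    Spec_minJumps_kamyu arr (minJumps_kamyu arr)

-- ===== LEMMAS AND PROOFS =====

-- ---- proof-side intermediate program: A, processed level by level ----

-- body of 'if p unvisited and in range: append', state (nxt, visited)
def pvStepB (arr : List Int) (s : List Int × PySem.Set Int) (p : Int) :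
    List Int × PySem.Set Int :=
  if p ∉ s.2 ∧ 0 ≤ p ∧ p < (arr.length : Int) then (s.1 ++ [p], PySem.Set.add s.2 p) else s

-- one frontier node of A expanded, state (nxt, visited, groups)
def pvExpandB (arr : List Int) (s : List Int × PySem.Set Int × PySem.Dict Int (List Int))
    (pos : Int) : List Int × PySem.Set Int × PySem.Dict Int (List Int) :=
  match PySem.List.pyGet? arr pos with
  | none => s
  | some x =>
    let t := (s.2.2.getD x [] ++ [pos - 1, pos + 1]).foldl (pvStepB arr) (s.1, s.2.1)
    (t.1, t.2, s.2.2.insert x [])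

-- A's BFS with the queue cut into levels
def pvLoopB (arr : List Int) :
    Nat → List Int → Int → PySem.Set Int → PySem.Dict Int (List Int) → Int
  | 0, _, step, _, _ => step
  | f + 1, frontier, step, visited, groups =>
    if ((arr.length : Int) - 1) ∈ frontier then step
    else
      let s := frontier.foldl (pvExpandB arr) ([], visited, groups)
      if s.1 = [] then step
      else pvLoopB arr f s.1 (step + 1) s.2.1 s.2.2

-- tag every frontier node with its BFS level, giving A's queue entries
def pvTag (k : Int) (l : List Int) : List (Int × Int) := l.map (fun u => (u, k))

-- number of in-range indices not yet visited (the fuel measure)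
def pvU (arr : List Int) (v : PySem.Set Int) : Nat :=
  ((Finset.range arr.length).filter (fun i : Nat => (i : Int) ∉ v)).card

-- ---- generic "folding over set(l) = folding over l" for an idempotent guarded step ----

theorem pv_good_fold_mono {σ α : Type} [BEq α] (h : σ → α → σ) (Good : α → σ → Prop)
    (good_mono : ∀ s p q, Good p s → Good p (h s q)) :
    ∀ (acc : List α) (s : σ) (p : α), Good p s → Good p (List.foldl h s acc) := by
  intro acc
  induction acc with
  | nil => intro s p hp; simpa using hp
  | cons a acc ih => intro s p hp; simpa using ih (h s a) p (good_mono s p a hp)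

theorem pv_mem_good {σ α : Type} [BEq α] (h : σ → α → σ) (Good : α → σ → Prop)
    (good_self : ∀ s p, Good p (h s p)) (good_mono : ∀ s p q, Good p s → Good p (h s q)) :
    ∀ (acc : List α) (s : σ) (p : α), p ∈ acc → Good p (List.foldl h s acc) := by
  intro acc
  induction acc with
  | nil => intro s p hp; cases hp
  | cons a acc ih =>
    intro s p hp
    rcases List.mem_cons.mp hp with rfl | hp
    · simpa using pv_good_fold_mono h Good good_mono acc (h s p) p (good_self s p)
    · simpa using ih (h s a) p hp

theorem pv_foldl_addfold {σ α : Type} [BEq α] [LawfulBEq α] (h : σ → α → σ)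
    (Good : α → σ → Prop)
    (good_noop : ∀ s p, Good p s → h s p = s)
    (good_self : ∀ s p, Good p (h s p)) (good_mono : ∀ s p q, Good p s → Good p (h s q)) :
    ∀ (l acc : List α) (s : σ),
      List.foldl h (List.foldl h s acc) l = List.foldl h s (List.foldl PySem.Set.add acc l) := by
  intro l
  induction l with
  | nil => intro acc s; rfl
  | cons p l ih =>
    intro acc s
    have key : List.foldl h s (PySem.Set.add acc p) = h (List.foldl h s acc) p := by
      by_cases hp : p ∈ acc
      · have hc : PySem.Set.add acc p = acc := by
          simp [PySem.Set.add, PySem.Set.contains, hp]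
        rw [hc, good_noop _ _ (pv_mem_good h Good good_self good_mono acc s p hp)]
      · have hc : PySem.Set.add acc p = acc ++ [p] := by
          simp [PySem.Set.add, PySem.Set.contains, hp]
        rw [hc, List.foldl_append]; rfl
    calc List.foldl h (List.foldl h s acc) (p :: l)
        = List.foldl h (h (List.foldl h s acc) p) l := rfl
      _ = List.foldl h (List.foldl h s (PySem.Set.add acc p)) l := by rw [key]
      _ = List.foldl h s (List.foldl PySem.Set.add (PySem.Set.add acc p) l) := ih _ s
      _ = List.foldl h s (List.foldl PySem.Set.add acc (p :: l)) := rfl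

theorem pv_foldl_ofList {σ α : Type} [BEq α] [LawfulBEq α] (h : σ → α → σ)
    (Good : α → σ → Prop)
    (good_noop : ∀ s p, Good p s → h s p = s)
    (good_self : ∀ s p, Good p (h s p)) (good_mono : ∀ s p q, Good p s → Good p (h s q))
    (l : List α) (s : σ) :
    List.foldl h s (PySem.Set.ofList l) = List.foldl h s l := by
  have := pv_foldl_addfold h Good good_noop good_self good_mono l [] s
  simpa [PySem.Set.ofList, PySem.Set.empty] using this.symm

-- the Good predicate for A's inner loop step
def pvGoodA (arr : List Int) (p : Int) (s : List (Int × Int) × PySem.Set Int) : Prop :=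
  p ∈ s.2 ∨ ¬(0 ≤ p ∧ p < (arr.length : Int))

theorem pvGoodA_noop (arr : List Int) (k : Int) :
    ∀ s p, pvGoodA arr p s → pvStepA arr k s p = s := by
  intro s p hp
  unfold pvStepA
  rw [if_neg]
  unfold pvGoodA at hp; tauto

theorem pvGoodA_self (arr : List Int) (k : Int) :
    ∀ s p, pvGoodA arr p (pvStepA arr k s p) := by
  intro s p
  unfold pvStepA pvGoodA
  split_ifs with h
  · left; simp [PySem.Set.mem_add]
  · tauto

theorem pvGoodA_mono (arr : List Int) (k : Int) :
    ∀ s p q, pvGoodA arr p s → pvGoodA arr p (pvStepA arr k s q) := by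
  intro s p q hp
  unfold pvGoodA at *
  rcases hp with hp | hp
  · unfold pvStepA; split_ifs with h
    · left; simp [PySem.Set.mem_add]; left; exact hp
    · left; exact hp
  · right; exact hp

theorem pvStepA_ofList (arr : List Int) (k : Int) (l : List Int)
    (s : List (Int × Int) × PySem.Set Int) :
    List.foldl (pvStepA arr k) s (PySem.Set.ofList l) = List.foldl (pvStepA arr k) s l :=
  pv_foldl_ofList (pvStepA arr k) (pvGoodA arr) (pvGoodA_noop arr k) (pvGoodA_self arr k)
    (pvGoodA_mono arr k) l s

-- ---- A's inner loop is B's inner loop with every appended node tagged k+1 ----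

theorem pv_rel (arr : List Int) (k : Int) :
    ∀ (cand : List Int) (qrest : List (Int × Int)) (nxt : List Int) (v : PySem.Set Int),
      List.foldl (pvStepA arr k) (qrest ++ pvTag (k + 1) nxt, v) cand
        = (qrest ++ pvTag (k + 1) (List.foldl (pvStepB arr) (nxt, v) cand).1,
           (List.foldl (pvStepB arr) (nxt, v) cand).2) := by
  intro cand
  induction cand with
  | nil => intro qrest nxt v; rfl
  | cons p cand ih =>
    intro qrest nxt v
    simp only [List.foldl_cons]
    by_cases h : p ∉ v ∧ 0 ≤ p ∧ p < (arr.length : Int)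
    · have ha : pvStepA arr k (qrest ++ pvTag (k + 1) nxt, v) p
          = (qrest ++ pvTag (k + 1) (nxt ++ [p]), PySem.Set.add v p) := by
        simp [pvStepA, h, pvTag]
      have hb : pvStepB arr (nxt, v) p = (nxt ++ [p], PySem.Set.add v p) := by
        simp [pvStepB, h]
      rw [ha, hb, ih]
    · have ha : pvStepA arr k (qrest ++ pvTag (k + 1) nxt, v) p
          = (qrest ++ pvTag (k + 1) nxt, v) := by simp [pvStepA, h]
      have hb : pvStepB arr (nxt, v) p = (nxt, v) := by simp [pvStepB, h]
      rw [ha, hb, ih]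

-- ---- characterization of the intermediate program's inner and per-level folds ----

theorem pv_foldB_char (arr : List Int) :
    ∀ (cand nxt0 : List Int) (v : PySem.Set Int),
      ∃ δ, List.foldl (pvStepB arr) (nxt0, v) cand = (nxt0 ++ δ, v ++ δ) ∧
        (∀ p ∈ δ, ((0 : Int) ≤ p ∧ p < (arr.length : Int)) ∧ p ∉ v) ∧
        (v.Nodup → (v ++ δ).Nodup) := by
  intro cand
  induction cand with
  | nil => intro nxt0 v; exact ⟨[], by simp, by simp, by simp⟩
  | cons p cand ih =>
    intro nxt0 v
    by_cases h : p ∉ v ∧ 0 ≤ p ∧ p < (arr.length : Int)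
    · have hb : pvStepB arr (nxt0, v) p = (nxt0 ++ [p], v ++ [p]) := by
        simp [pvStepB, h, PySem.Set.add, PySem.Set.contains]
      obtain ⟨δ, hfold, hprop, hnd⟩ := ih (nxt0 ++ [p]) (v ++ [p])
      refine ⟨p :: δ, ?_, ?_, ?_⟩
      · simpa [hb, List.append_assoc] using hfold
      · intro q hq
        rcases List.mem_cons.mp hq with rfl | hq
        · exact ⟨h.2, h.1⟩
        · refine ⟨(hprop q hq).1, fun hv => (hprop q hq).2 (by simp [hv])⟩
      · intro hv
        have : (v ++ [p]).Nodup := by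
          refine List.Nodup.append hv (by simp) ?_
          intro a ha hb
          rcases List.mem_singleton.mp hb with rfl
          exact h.1 ha
        simpa [List.append_assoc] using hnd this
    · have hb : pvStepB arr (nxt0, v) p = (nxt0, v) := by simp [pvStepB, h]
      obtain ⟨δ, hfold, hprop, hnd⟩ := ih nxt0 v
      exact ⟨δ, by simpa [hb] using hfold, hprop, hnd⟩

theorem pv_levelB_char (arr : List Int) :
    ∀ (lvl nxt0 : List Int) (v : PySem.Set Int) (g : PySem.Dict Int (List Int)),
      ∃ δ g', List.foldl (pvExpandB arr) (nxt0, v, g) lvl = (nxt0 ++ δ, v ++ δ, g') ∧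
        (∀ p ∈ δ, ((0 : Int) ≤ p ∧ p < (arr.length : Int)) ∧ p ∉ v) ∧
        (v.Nodup → (v ++ δ).Nodup) := by
  intro lvl
  induction lvl with
  | nil => intro nxt0 v g; exact ⟨[], g, by simp, by simp, by simp⟩
  | cons u lvl ih =>
    intro nxt0 v g
    have step : ∃ δ1 g1, pvExpandB arr (nxt0, v, g) u = (nxt0 ++ δ1, v ++ δ1, g1) ∧
        (∀ p ∈ δ1, ((0 : Int) ≤ p ∧ p < (arr.length : Int)) ∧ p ∉ v) ∧
        (v.Nodup → (v ++ δ1).Nodup) := by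
      unfold pvExpandB
      cases hx : PySem.List.pyGet? arr u with
      | none => exact ⟨[], g, by simp, by simp, by simp⟩
      | some x =>
        obtain ⟨δ1, hfold, hprop, hnd⟩ :=
          pv_foldB_char arr (g.getD x [] ++ [u - 1, u + 1]) nxt0 v
        exact ⟨δ1, g.insert x [], by simp [hfold], hprop, hnd⟩
    obtain ⟨δ1, g1, hstep, hprop1, hnd1⟩ := step
    obtain ⟨δ2, g2, hfold2, hprop2, hnd2⟩ := ih (nxt0 ++ δ1) (v ++ δ1) g1
    refine ⟨δ1 ++ δ2, g2, ?_, ?_, ?_⟩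
    · simpa [hstep, List.append_assoc] using hfold2
    · intro p hp
      rcases List.mem_append.mp hp with hp | hp
      · exact hprop1 p hp
      · exact ⟨(hprop2 p hp).1, fun hv => (hprop2 p hp).2 (by simp [hv])⟩
    · intro hv
      simpa [List.append_assoc] using hnd2 (hnd1 hv)

-- ---- A processes one whole level exactly as the per-level fold ----

theorem pv_level (arr : List Int) (k : Int) :
    ∀ (lvl : List Int) (f : Nat) (nxt0 : List Int) (v : PySem.Set Int)
      (g : PySem.Dict Int (List Int)) (st : Int),
      (∀ u ∈ lvl, u ≠ (arr.length : Int) - 1) →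
      pvLoopA arr (lvl.length + f) (pvTag k lvl ++ pvTag (k + 1) nxt0) v g st
        = pvLoopA arr f (pvTag (k + 1) (List.foldl (pvExpandB arr) (nxt0, v, g) lvl).1)
            (List.foldl (pvExpandB arr) (nxt0, v, g) lvl).2.1
            (List.foldl (pvExpandB arr) (nxt0, v, g) lvl).2.2
            (if lvl = [] then st else k) := by
  intro lvl
  induction lvl with
  | nil => intro f nxt0 v g st _; simp [pvTag]
  | cons u lvl ih =>
    intro f nxt0 v g st hnt
    have hu : u ≠ (arr.length : Int) - 1 := hnt u (by simp)
    have hfuel : (u :: lvl).length + f = (lvl.length + f) + 1 := by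
      simp [List.length_cons]; omega
    rw [hfuel]
    have hq : pvTag k (u :: lvl) ++ pvTag (k + 1) nxt0
        = (u, k) :: (pvTag k lvl ++ pvTag (k + 1) nxt0) := by simp [pvTag]
    rw [hq]
    show (if u = (arr.length : Int) - 1 then k else _) = _
    rw [if_neg hu]
    cases hx : PySem.List.pyGet? arr u with
    | none =>
      have hexp : pvExpandB arr (nxt0, v, g) u = (nxt0, v, g) := by
        unfold pvExpandB; rw [hx]
      simp only [List.foldl_cons, hexp]
      rw [ih f nxt0 v g k (fun w hw => hnt w (by simp [hw]))]
      simp [ite_self]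
    | some x =>
      have hfoldA := pvStepA_ofList arr k (g.getD x [] ++ [u - 1, u + 1])
        (pvTag k lvl ++ pvTag (k + 1) nxt0, v)
      have hrel := pv_rel arr k (g.getD x [] ++ [u - 1, u + 1]) (pvTag k lvl) nxt0 v
      have hexp : pvExpandB arr (nxt0, v, g) u
          = (((g.getD x [] ++ [u - 1, u + 1]).foldl (pvStepB arr) (nxt0, v)).1,
             ((g.getD x [] ++ [u - 1, u + 1]).foldl (pvStepB arr) (nxt0, v)).2,
             g.insert x []) := by
        unfold pvExpandB; rw [hx]
      simp only [List.foldl_cons, hexp]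
      rw [hfoldA, hrel]
      rw [ih f _ _ _ k (fun w hw => hnt w (by simp [hw]))]
      simp [ite_self]

-- ---- if the target sits in the current level, A returns the current step ----

theorem pv_hit (arr : List Int) (k : Int) :
    ∀ (lvl : List Int) (f : Nat) (acc : List Int) (v : PySem.Set Int)
      (g : PySem.Dict Int (List Int)) (st : Int),
      (arr.length : Int) - 1 ∈ lvl → lvl.length ≤ f →
      pvLoopA arr f (pvTag k lvl ++ pvTag (k + 1) acc) v g st = k := by
  intro lvl
  induction lvl with
  | nil => intro f acc v g st h; cases h
  | cons u lvl ih =>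
    intro f acc v g st hmem hlen
    obtain ⟨f, rfl⟩ : ∃ f', f = f' + 1 := by
      cases f with
      | zero => simp [List.length_cons] at hlen
      | succ f => exact ⟨f, rfl⟩
    have hq : pvTag k (u :: lvl) ++ pvTag (k + 1) acc
        = (u, k) :: (pvTag k lvl ++ pvTag (k + 1) acc) := by simp [pvTag]
    rw [hq]
    by_cases hu : u = (arr.length : Int) - 1
    · show (if u = (arr.length : Int) - 1 then k else _) = k
      rw [if_pos hu]
    · have hmem' : (arr.length : Int) - 1 ∈ lvl := by
        rcases List.mem_cons.mp hmem with h | h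
        · exact absurd h.symm hu
        · exact h
      have hlen' : lvl.length ≤ f := by simp [List.length_cons] at hlen; omega
      show (if u = (arr.length : Int) - 1 then k else _) = k
      rw [if_neg hu]
      cases hx : PySem.List.pyGet? arr u with
      | none => exact ih f acc v g k hmem' hlen'
      | some x =>
        have hfoldA := pvStepA_ofList arr k (g.getD x [] ++ [u - 1, u + 1])
          (pvTag k lvl ++ pvTag (k + 1) acc, v)
        have hrel := pv_rel arr k (g.getD x [] ++ [u - 1, u + 1]) (pvTag k lvl) acc v
        simp only [hfoldA, hrel]
        exact ih f _ _ _ k hmem' hlen'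

-- ---- the unvisited-count bookkeeping ----

theorem pvU_append (arr : List Int) (δ : List Int) (v : PySem.Set Int)
    (hδ : ∀ p ∈ δ, ((0 : Int) ≤ p ∧ p < (arr.length : Int)) ∧ p ∉ v)
    (hnd : (v ++ δ).Nodup) :
    pvU arr (v ++ δ) + δ.length = pvU arr v := by
  have hδnd : δ.Nodup := hnd.of_append_right
  have hinj : ∀ x ∈ δ, ∀ y ∈ δ, x.toNat = y.toNat → x = y := by
    intro x hx y hy hxy
    have hx0 := (hδ x hx).1.1
    have hy0 := (hδ y hy).1.1
    omega
  have hδ'nd : (δ.map Int.toNat).Nodup := List.Nodup.map_on hinj hδnd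
  have hpart := Finset.card_filter_add_card_filter_not
    (s := (Finset.range arr.length).filter (fun i : Nat => (i : Int) ∉ v))
    (p := fun i : Nat => (i : Int) ∈ δ)
  have h1 : ((Finset.range arr.length).filter (fun i : Nat => (i : Int) ∉ v)).filter
      (fun i : Nat => (i : Int) ∈ δ) = (δ.map Int.toNat).toFinset := by
    ext i
    simp only [Finset.mem_filter, Finset.mem_range, List.mem_toFinset, List.mem_map]
    constructor
    · rintro ⟨⟨_, _⟩, hi⟩
      exact ⟨(i : Int), hi, by omega⟩
    · rintro ⟨p, hp, rfl⟩
      obtain ⟨⟨hp0, hpn⟩, hpv⟩ := hδ p hp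
      have hcast : ((p.toNat : Nat) : Int) = p := by omega
      refine ⟨⟨by omega, by rw [hcast]; exact hpv⟩, by rw [hcast]; exact hp⟩
  have h2 : ((Finset.range arr.length).filter (fun i : Nat => (i : Int) ∉ v)).filter
      (fun i : Nat => ¬ (i : Int) ∈ δ)
      = (Finset.range arr.length).filter (fun i : Nat => (i : Int) ∉ v ++ δ) := by
    rw [Finset.filter_filter]
    apply Finset.filter_congr
    intro i _
    simp only [List.mem_append]
    tauto
  have h3 : ((δ.map Int.toNat).toFinset).card = δ.length := by
    rw [List.toFinset_card_of_nodup hδ'nd, List.length_map]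
  unfold pvU
  rw [← h2]
  rw [h1, h3] at hpart
  omega

-- ---- the main simulation: A on a tagged frontier equals the level program round for round ----

theorem pv_main (arr : List Int) :
    ∀ (fB : Nat) (lvl : List Int) (fA : Nat) (v : PySem.Set Int)
      (g : PySem.Dict Int (List Int)) (k st : Int),
      lvl ≠ [] → v.Nodup → lvl.length + pvU arr v ≤ fA → pvU arr v < fB →
      pvLoopA arr fA (pvTag k lvl) v g st = pvLoopB arr fB lvl k v g := by
  intro fB
  induction fB with
  | zero => intro lvl fA v g k st _ _ _ h; omega
  | succ fB ih =>
    intro lvl fA v g k st hne hv hfA hfB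
    by_cases hmem : (arr.length : Int) - 1 ∈ lvl
    · have hB : pvLoopB arr (fB + 1) lvl k v g = k := by
        simp [pvLoopB, hmem]
      rw [hB]
      have : pvTag k lvl = pvTag k lvl ++ pvTag (k + 1) [] := by simp [pvTag]
      rw [this]
      exact pv_hit arr k lvl fA [] v g st hmem (by omega)
    · obtain ⟨fA', rfl⟩ : ∃ fA', fA = lvl.length + fA' := by
        refine ⟨fA - lvl.length, ?_⟩; omega
      have hnt : ∀ u ∈ lvl, u ≠ (arr.length : Int) - 1 := by
        intro u hu h; exact hmem (h ▸ hu)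
      have hlev := pv_level arr k lvl fA' [] v g st hnt
      obtain ⟨δ, g', hfold, hprop, hnd⟩ := pv_levelB_char arr lvl [] v g
      have hU := pvU_append arr δ v hprop (hnd hv)
      have hA : pvTag k lvl ++ pvTag (k + 1) [] = pvTag k lvl := by simp [pvTag]
      rw [hA] at hlev
      rw [hlev, if_neg hne, hfold]
      have hB : pvLoopB arr (fB + 1) lvl k v g
          = if δ = [] then k else pvLoopB arr fB δ (k + 1) (v ++ δ) g' := by
        simp only [pvLoopB, if_neg hmem, hfold]
        simp
      rw [hB]
      by_cases hδ : δ = []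
      · subst hδ
        simp only [List.nil_append]
        cases fA' <;> simp [pvTag, pvLoopA]
      · rw [if_neg hδ]
        simp only [List.nil_append]
        have hlen : 1 ≤ δ.length := by
          cases δ with
          | nil => exact absurd rfl hδ
          | cons a l => simp
        exact ih δ fA' (v ++ δ) g' (k + 1) k hδ (hnd hv) (by omega) (by omega)

-- ---- NEW: characterization of one round, and the bisimulation with Port B ----

-- indices of arr holding the value x, in order
def pvOrig (arr : List Int) (x : Int) : List Int :=
  ((PySem.List.enumerate arr).filter (fun ix => ix.2 == x)).map (fun ix => ix.1)

theorem pv_mem_pvOrig (arr : List Int) (x j : Int) :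
    j ∈ pvOrig arr x ↔ 0 ≤ j ∧ j < (arr.length : Int) ∧ PySem.List.pyGet? arr j = some x := by
  unfold pvOrig
  simp only [List.mem_map, List.mem_filter, PySem.List.mem_enumerate_iff]
  constructor
  · rintro ⟨⟨i, y⟩, ⟨⟨k, hk, hik⟩, hy⟩, rfl⟩
    obtain ⟨rfl, rfl⟩ := Prod.mk.injEq .. ▸ hik
    simp only [beq_iff_eq] at hy
    refine ⟨by omega, by simpa using hk, ?_⟩
    have : ((0 + (k : Int))) = ((k : Nat) : Int) := by omega
    rw [this, PySem.List.pyGet?_natCast]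
    simp [List.getElem?_eq_getElem hk, hy]
  · rintro ⟨h0, hn, hx⟩
    have hk : j.toNat < arr.length := by omega
    have hj : j = ((j.toNat : Nat) : Int) := by omega
    rw [hj, PySem.List.pyGet?_natCast, List.getElem?_eq_getElem hk] at hx
    have hxx : arr[j.toNat] = x := Option.some.inj hx
    refine ⟨(j, x), ⟨⟨j.toNat, hk, ?_⟩, by simp⟩, rfl⟩
    rw [Prod.mk.injEq]
    exact ⟨by omega, hxx.symm⟩

theorem pv_groups_fold (l : List (Int × Int)) :
    ∀ (d : PySem.Dict Int (List Int)) (x : Int),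
      (l.foldl (fun d ix => d.insert ix.2 (d.getD ix.2 [] ++ [ix.1])) d).getD x []
        = d.getD x [] ++ ((l.filter (fun ix => ix.2 == x)).map (fun ix => ix.1)) := by
  induction l with
  | nil => intro d x; simp
  | cons a l ih =>
    intro d x
    simp only [List.foldl_cons, List.filter_cons]
    rw [ih]
    rw [PySem.Dict.getD_insert]
    by_cases hx : a.2 = x
    · subst hx
      simp
    · have hne : ¬ x = a.2 := fun h => hx h.symm
      have hb : ¬ (a.2 == x) = true := by simpa using hx
      simp [hne, hb]

theorem pv_groupsA_getD (arr : List Int) (x : Int) :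
    (pvGroupsA arr).getD x [] = pvOrig arr x := by
  unfold pvGroupsA pvOrig
  rw [pv_groups_fold]
  simp

-- visited-set membership through the inner fold
theorem pv_stepB_mem (arr : List Int) :
    ∀ (cand δ0 : List Int) (v : PySem.Set Int) (j : Int),
      j ∈ (cand.foldl (pvStepB arr) (δ0, v)).2
        ↔ j ∈ v ∨ (j ∈ cand ∧ 0 ≤ j ∧ j < (arr.length : Int)) := by
  intro cand
  induction cand with
  | nil => intro δ0 v j; simp
  | cons p cand ih =>
    intro δ0 v j
    simp only [List.foldl_cons]
    by_cases h : p ∉ v ∧ 0 ≤ p ∧ p < (arr.length : Int)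
    · have hb : pvStepB arr (δ0, v) p = (δ0 ++ [p], PySem.Set.add v p) := by
        simp [pvStepB, h]
      rw [hb, ih]
      simp only [PySem.Set.mem_add, List.mem_cons]
      constructor
      · rintro ((hj | rfl) | ⟨hj, hr⟩)
        · exact Or.inl hj
        · exact Or.inr ⟨Or.inl rfl, h.2⟩
        · exact Or.inr ⟨Or.inr hj, hr⟩
      · rintro (hj | ⟨(rfl | hj), hr⟩)
        · exact Or.inl (Or.inl hj)
        · exact Or.inl (Or.inr rfl)
        · exact Or.inr ⟨hj, hr⟩
    · have hb : pvStepB arr (δ0, v) p = (δ0, v) := by simp [pvStepB, h]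
      rw [hb, ih]
      simp only [List.mem_cons]
      constructor
      · rintro (hj | ⟨hj, hr⟩)
        · exact Or.inl hj
        · exact Or.inr ⟨Or.inr hj, hr⟩
      · rintro (hj | ⟨(rfl | hj), hr⟩)
        · exact Or.inl hj
        · rcases not_and_or.mp h with hv | hr2
          · exact Or.inl (not_not.mp hv)
          · exact absurd hr hr2
        · exact Or.inr ⟨hj, hr⟩

-- the candidates a whole round generates, as a predicate on the input only
def pvCand (arr : List Int) (L : List Int) (U : PySem.Set Int) (j : Int) : Prop :=
  (j + 1) ∈ L ∨ (j - 1) ∈ L ∨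
    ∃ x, PySem.List.pyGet? arr j = some x ∧ x ∉ U ∧
      ∃ p ∈ L, PySem.List.pyGet? arr p = some x

theorem pv_round_mem (arr : List Int) :
    ∀ (L δ0 : List Int) (v : PySem.Set Int) (g : PySem.Dict Int (List Int))
      (U : PySem.Set Int),
      (∀ p ∈ L, 0 ≤ p ∧ p < (arr.length : Int)) →
      (∀ x, g.getD x [] = if x ∈ U then [] else pvOrig arr x) →
      (∀ j, j ∈ (L.foldl (pvExpandB arr) (δ0, v, g)).2.1
          ↔ j ∈ v ∨ (0 ≤ j ∧ j < (arr.length : Int) ∧ pvCand arr L U j)) ∧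
      (∀ x, (L.foldl (pvExpandB arr) (δ0, v, g)).2.2.getD x []
          = if (x ∈ U ∨ ∃ p ∈ L, PySem.List.pyGet? arr p = some x) then []
            else pvOrig arr x) := by
  intro L
  induction L with
  | nil =>
    intro δ0 v g U _ hg
    refine ⟨fun j => ?_, fun x => ?_⟩
    · simp [pvCand]
    · simpa using hg x
  | cons p L ih =>
    intro δ0 v g U hL hg
    obtain ⟨hp0, hp1⟩ := hL p List.mem_cons_self
    obtain ⟨x, hx⟩ : ∃ x, PySem.List.pyGet? arr p = some x := by
      have hk : p.toNat < arr.length := by omega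
      have hpc : p = ((p.toNat : Nat) : Int) := by omega
      rw [hpc, PySem.List.pyGet?_natCast, List.getElem?_eq_getElem hk]
      exact ⟨arr[p.toNat], rfl⟩
    have hexp : pvExpandB arr (δ0, v, g) p
        = (((g.getD x [] ++ [p - 1, p + 1]).foldl (pvStepB arr) (δ0, v)).1,
           ((g.getD x [] ++ [p - 1, p + 1]).foldl (pvStepB arr) (δ0, v)).2,
           g.insert x []) := by
      unfold pvExpandB; rw [hx]
    have hgx : g.getD x [] = if x ∈ U then [] else pvOrig arr x := hg x
    have hg1 : ∀ x', (g.insert x []).getD x' []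
        = if x' ∈ PySem.Set.add U x then [] else pvOrig arr x' := by
      intro x'
      rw [PySem.Dict.getD_insert]
      by_cases h1 : x' = x
      · subst h1
        simp [PySem.Set.mem_add]
      · rw [if_neg h1, hg x']
        have hiff : x' ∈ U ↔ x' ∈ PySem.Set.add U x := by
          simp [PySem.Set.mem_add, h1]
        exact if_congr hiff rfl rfl
    obtain ⟨ih1, ih2⟩ := ih _ _ (g.insert x []) (PySem.Set.add U x)
      (fun q hq => hL q (List.mem_cons_of_mem _ hq)) hg1
    simp only [List.foldl_cons, hexp]
    refine ⟨fun j => ?_, fun x' => ?_⟩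
    · rw [ih1 j, pv_stepB_mem arr (g.getD x [] ++ [p - 1, p + 1]) δ0 v j]
      constructor
      · rintro ((hv | ⟨hc, hr⟩) | ⟨hr0, hr1, hcand⟩)
        · exact Or.inl hv
        · refine Or.inr ⟨hr.1, hr.2, ?_⟩
          rcases List.mem_append.mp hc with hco | hpm
          · rw [hgx] at hco
            by_cases hxU : x ∈ U
            · rw [if_pos hxU] at hco; cases hco
            · rw [if_neg hxU] at hco
              obtain ⟨_, _, hjx⟩ := (pv_mem_pvOrig arr x j).mp hco
              exact Or.inr (Or.inr ⟨x, hjx, hxU, p, List.mem_cons_self, hx⟩)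
          · rcases List.mem_cons.mp hpm with rfl | hpm2
            · left
              have he : p - 1 + 1 = p := by ring
              rw [he]
              exact List.mem_cons_self
            · rcases List.mem_singleton.mp hpm2 with rfl
              right; left
              have he : p + 1 - 1 = p := by ring
              rw [he]
              exact List.mem_cons_self
        · refine Or.inr ⟨hr0, hr1, ?_⟩
          unfold pvCand at hcand ⊢
          rcases hcand with h1 | h2 | ⟨y, hjy, hyU1, q, hqL, hqy⟩
          · exact Or.inl (List.mem_cons_of_mem _ h1)
          · exact Or.inr (Or.inl (List.mem_cons_of_mem _ h2))
          · have hyU : y ∉ U := fun h => hyU1 (by simp [PySem.Set.mem_add, h])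
            exact Or.inr (Or.inr ⟨y, hjy, hyU, q, List.mem_cons_of_mem _ hqL, hqy⟩)
      · rintro (hv | ⟨hr0, hr1, hcand⟩)
        · exact Or.inl (Or.inl hv)
        · unfold pvCand at hcand
          rcases hcand with h1 | h2 | ⟨y, hjy, hyU, q, hqPL, hqy⟩
          · rcases List.mem_cons.mp h1 with hpe | h1L
            · left; right
              refine ⟨List.mem_append.mpr (Or.inr ?_), hr0, hr1⟩
              have he : j = p - 1 := by omega
              simp [he]
            · exact Or.inr ⟨hr0, hr1, Or.inl h1L⟩
          · rcases List.mem_cons.mp h2 with hpe | h2L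
            · left; right
              refine ⟨List.mem_append.mpr (Or.inr ?_), hr0, hr1⟩
              have he : j = p + 1 := by omega
              simp [he]
            · exact Or.inr ⟨hr0, hr1, Or.inr (Or.inl h2L)⟩
          · rcases List.mem_cons.mp hqPL with rfl | hqL
            · have hyx : y = x := by
                rw [hx] at hqy
                exact (Option.some.inj hqy).symm
              subst hyx
              left; right
              refine ⟨List.mem_append.mpr (Or.inl ?_), hr0, hr1⟩
              rw [hgx, if_neg hyU]
              exact (pv_mem_pvOrig arr y j).mpr ⟨hr0, hr1, hjy⟩
            · by_cases hyx : y = x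
              · subst hyx
                left; right
                refine ⟨List.mem_append.mpr (Or.inl ?_), hr0, hr1⟩
                rw [hgx, if_neg hyU]
                exact (pv_mem_pvOrig arr y j).mpr ⟨hr0, hr1, hjy⟩
              · refine Or.inr ⟨hr0, hr1, Or.inr (Or.inr ⟨y, hjy, ?_, q, hqL, hqy⟩)⟩
                simp [PySem.Set.mem_add, hyU, hyx]
    · rw [ih2 x']
      have hcond : (x' ∈ PySem.Set.add U x ∨ ∃ q ∈ L, PySem.List.pyGet? arr q = some x')
          ↔ (x' ∈ U ∨ ∃ q ∈ p :: L, PySem.List.pyGet? arr q = some x') := by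
        simp only [PySem.Set.mem_add, List.mem_cons]
        constructor
        · rintro ((h | rfl) | ⟨q, hq, hqx⟩)
          · exact Or.inl h
          · exact Or.inr ⟨p, Or.inl rfl, hx⟩
          · exact Or.inr ⟨q, Or.inr hq, hqx⟩
        · rintro (h | ⟨q, (rfl | hq), hqx⟩)
          · exact Or.inl (Or.inl h)
          · rw [hx] at hqx
            exact Or.inl (Or.inr (Option.some.inj hqx).symm)
          · exact Or.inr ⟨q, hq, hqx⟩
      exact if_congr hcond rfl rfl

theorem pv_valsC_mem (arr : List Int) :
    ∀ (l : List Int) (s : PySem.Set Int) (x : Int),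
      x ∈ l.foldl
        (fun s p => match PySem.List.pyGet? arr p with
          | some y => PySem.Set.add s y
          | none => s) s
        ↔ x ∈ s ∨ ∃ p ∈ l, PySem.List.pyGet? arr p = some x := by
  intro l
  induction l with
  | nil => intro s x; simp
  | cons p l ih =>
    intro s x
    simp only [List.foldl_cons]
    cases hp : PySem.List.pyGet? arr p with
    | none =>
      rw [ih]
      simp only [List.mem_cons]
      constructor
      · rintro (hx | ⟨q, hq, hqx⟩)
        · exact Or.inl hx
        · exact Or.inr ⟨q, Or.inr hq, hqx⟩
      · rintro (hx | ⟨q, (rfl | hq), hqx⟩)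
        · exact Or.inl hx
        · rw [hp] at hqx; cases hqx
        · exact Or.inr ⟨q, hq, hqx⟩
    | some y =>
      rw [ih]
      simp only [PySem.Set.mem_add, List.mem_cons]
      constructor
      · rintro ((hx | rfl) | ⟨q, hq, hqx⟩)
        · exact Or.inl hx
        · exact Or.inr ⟨p, Or.inl rfl, hp⟩
        · exact Or.inr ⟨q, Or.inr hq, hqx⟩
      · rintro (hx | ⟨q, (rfl | hq), hqx⟩)
        · exact Or.inl (Or.inl hx)
        · rw [hp] at hqx
          exact Or.inl (Or.inr (Option.some.injEq .. ▸ hqx).symm)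
        · exact Or.inr ⟨q, hq, hqx⟩

theorem pv_condC_iff (arr : List Int) (F vals : PySem.Set Int) (j : Int) :
    pvCondC arr F vals j = true
      ↔ ((j - 1) ∈ F ∨ (j + 1) ∈ F ∨ ∃ x, PySem.List.pyGet? arr j = some x ∧ x ∈ vals) := by
  unfold pvCondC
  cases PySem.List.pyGet? arr j with
  | none => simp
  | some x => simp; tauto

theorem pv_scanC_mem (arr : List Int) (F vals : PySem.Set Int) :
    ∀ (rem : List Int) (s0 : PySem.Set Int × List Int) (j : Int),
      (j ∈ (rem.foldl (pvScanC arr F vals) s0).1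
          ↔ j ∈ s0.1 ∨ (j ∈ rem ∧ pvCondC arr F vals j = true)) ∧
      (j ∈ (rem.foldl (pvScanC arr F vals) s0).2
          ↔ j ∈ s0.2 ∨ (j ∈ rem ∧ pvCondC arr F vals j = false)) := by
  intro rem
  induction rem with
  | nil => intro s0 j; simp
  | cons i rem ih =>
    intro s0 j
    simp only [List.foldl_cons]
    by_cases h : pvCondC arr F vals i = true
    · have hs : pvScanC arr F vals s0 i = (PySem.Set.add s0.1 i, s0.2) := by
        simp [pvScanC, h]
      rw [hs]
      obtain ⟨ih1, ih2⟩ := ih (PySem.Set.add s0.1 i, s0.2) j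
      constructor
      · rw [ih1]
        simp only [PySem.Set.mem_add, List.mem_cons]
        constructor
        · rintro ((hj | rfl) | ⟨hj, hc⟩)
          · exact Or.inl hj
          · exact Or.inr ⟨Or.inl rfl, h⟩
          · exact Or.inr ⟨Or.inr hj, hc⟩
        · rintro (hj | ⟨(rfl | hj), hc⟩)
          · exact Or.inl (Or.inl hj)
          · exact Or.inl (Or.inr rfl)
          · exact Or.inr ⟨hj, hc⟩
      · rw [ih2]
        simp only [List.mem_cons]
        constructor
        · rintro (hj | ⟨hj, hc⟩)
          · exact Or.inl hj
          · exact Or.inr ⟨Or.inr hj, hc⟩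
        · rintro (hj | ⟨(rfl | hj), hc⟩)
          · exact Or.inl hj
          · rw [h] at hc; cases hc
          · exact Or.inr ⟨hj, hc⟩
    · have hs : pvScanC arr F vals s0 i = (s0.1, s0.2 ++ [i]) := by
        simp [pvScanC, h]
      rw [hs]
      obtain ⟨ih1, ih2⟩ := ih (s0.1, s0.2 ++ [i]) j
      have hf : pvCondC arr F vals i = false := by simpa using h
      constructor
      · rw [ih1]
        simp only [List.mem_cons]
        constructor
        · rintro (hj | ⟨hj, hc⟩)
          · exact Or.inl hj
          · exact Or.inr ⟨Or.inr hj, hc⟩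
        · rintro (hj | ⟨(rfl | hj), hc⟩)
          · exact Or.inl hj
          · rw [hf] at hc; cases hc
          · exact Or.inr ⟨hj, hc⟩
      · rw [ih2]
        simp only [List.mem_append, List.mem_cons, List.not_mem_nil, or_false]
        constructor
        · rintro ((hj | rfl) | ⟨hj, hc⟩)
          · exact Or.inl hj
          · exact Or.inr ⟨Or.inl rfl, hf⟩
          · exact Or.inr ⟨Or.inr hj, hc⟩
        · rintro (hj | ⟨(rfl | hj), hc⟩)
          · exact Or.inl (Or.inl hj)
          · exact Or.inl (Or.inr rfl)
          · exact Or.inr ⟨hj, hc⟩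

theorem pv_exists_max (l : List Int) (h : l ≠ []) : ∃ m ∈ l, ∀ i ∈ l, i ≤ m := by
  induction l with
  | nil => exact absurd rfl h
  | cons a l ih =>
    cases l with
    | nil => exact ⟨a, by simp, by simp⟩
    | cons b l =>
      obtain ⟨m, hm, hmax⟩ := ih (by simp)
      by_cases ha : a ≤ m
      · exact ⟨m, List.mem_cons_of_mem a hm, by
          intro i hi
          rcases List.mem_cons.mp hi with rfl | hi
          · exact ha
          · exact hmax i hi⟩
      · exact ⟨a, List.mem_cons_self, by
          intro i hi
          rcases List.mem_cons.mp hi with rfl | hi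
          · exact le_refl i
          · exact le_trans (hmax i hi) (by omega)⟩

-- the bisimulation: the level program on A's state equals Port B's loop
theorem pv_bisim (arr : List Int) :
    ∀ (f : Nat) (L : List Int) (FC : PySem.Set Int) (vA : PySem.Set Int)
      (rem : List Int) (g : PySem.Dict Int (List Int)) (U : PySem.Set Int) (st : Int),
      (∀ j, j ∈ L ↔ j ∈ FC) →
      L ≠ [] →
      (∀ p ∈ L, 0 ≤ p ∧ p < (arr.length : Int)) →
      (∀ j, j ∈ rem ↔ (0 ≤ j ∧ j < (arr.length : Int) ∧ j ∉ vA)) →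
      (∀ x, g.getD x [] = if x ∈ U then [] else pvOrig arr x) →
      (∀ i, i ∈ vA → i ∉ L → (i + 1 ∈ vA ∨ (arr.length : Int) ≤ i + 1)) →
      (∀ p ∈ L, p ∈ vA) →
      ((arr.length : Int) - 1 ∈ vA → (arr.length : Int) - 1 ∈ L) →
      (0 : Int) ∈ vA →
      (∀ i ∈ vA, 0 ≤ i ∧ i < (arr.length : Int)) →
      pvLoopB arr f L st vA g = pvLoopC arr f FC rem U st := by
  intro f L FC vA rem g U st
  induction f generalizing L FC vA rem g U st with
  | zero => intro _ _ _ _ _ _ _ _ _ _; rfl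
  | succ f ih =>
    intro h1 h2 h3 h4 h5 h6 h7 h8 h9 h10
    have hFCne : FC ≠ [] := by
      obtain ⟨p, hp⟩ := List.exists_mem_of_ne_nil L h2
      exact List.ne_nil_of_mem ((h1 p).mp hp)
    by_cases hmem : (arr.length : Int) - 1 ∈ L
    · have hmemC : (arr.length : Int) - 1 ∈ FC := (h1 _).mp hmem
      simp [pvLoopB, pvLoopC, hFCne, hmemC, hmem]
    · have hmemC : (arr.length : Int) - 1 ∉ FC := fun h => hmem ((h1 _).mpr h)
      obtain ⟨δ, g', hfold, hprop, hnd⟩ := pv_levelB_char arr L [] vA g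
      simp only [List.nil_append] at hfold
      obtain ⟨hmemv, hmemg⟩ := pv_round_mem arr L [] vA g U h3 h5
      rw [hfold] at hmemv hmemg
      simp only at hmemv hmemg
      -- δ is exactly the new level
      have hδ : ∀ j, j ∈ δ ↔
          (0 ≤ j ∧ j < (arr.length : Int) ∧ j ∉ vA ∧ pvCand arr L U j) := by
        intro j
        constructor
        · intro hj
          have h0 := hprop j hj
          have hin : j ∈ vA ++ δ := List.mem_append.mpr (Or.inr hj)
          rcases (hmemv j).mp hin with hv | ⟨ha, hb, hc⟩
          · exact absurd hv h0.2
          · exact ⟨ha, hb, h0.2, hc⟩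
        · rintro ⟨ha, hb, hnv, hc⟩
          have hin : j ∈ vA ++ δ := (hmemv j).mpr (Or.inr ⟨ha, hb, hc⟩)
          rcases List.mem_append.mp hin with hv | hv
          · exact absurd hv hnv
          · exact hv
      -- Port B's value set
      have hvals : ∀ x, x ∈ PySem.Set.diff (pvValsC arr FC) U
          ↔ ((∃ p ∈ L, PySem.List.pyGet? arr p = some x) ∧ x ∉ U) := by
        intro x
        rw [PySem.Set.mem_diff]
        unfold pvValsC
        rw [pv_valsC_mem arr FC PySem.Set.empty x]
        constructor
        · rintro ⟨(he | ⟨p, hp, hpx⟩), hxU⟩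
          · cases he
          · exact ⟨⟨p, (h1 p).mpr hp, hpx⟩, hxU⟩
        · rintro ⟨⟨p, hp, hpx⟩, hxU⟩
          exact ⟨Or.inr ⟨p, (h1 p).mp hp, hpx⟩, hxU⟩
      -- Port B's per-index condition is exactly pvCand
      have hcondC : ∀ j,
          pvCondC arr FC (PySem.Set.diff (pvValsC arr FC) U) j = true ↔ pvCand arr L U j := by
        intro j
        rw [pv_condC_iff]
        unfold pvCand
        rw [← h1 (j - 1), ← h1 (j + 1)]
        constructor
        · rintro (h | h | ⟨x, hjx, hxv⟩)
          · exact Or.inr (Or.inl h)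
          · exact Or.inl h
          · obtain ⟨⟨p, hp, hpx⟩, hxU⟩ := (hvals x).mp hxv
            exact Or.inr (Or.inr ⟨x, hjx, hxU, p, hp, hpx⟩)
        · rintro (h | h | ⟨x, hjx, hxU, p, hp, hpx⟩)
          · exact Or.inr (Or.inl h)
          · exact Or.inl h
          · exact Or.inr (Or.inr ⟨x, hjx, (hvals x).mpr ⟨⟨p, hp, hpx⟩, hxU⟩⟩)
      -- the scan results
      obtain ⟨hsc1, hsc2⟩ :
          (∀ j, j ∈ (rem.foldl (pvScanC arr FC (PySem.Set.diff (pvValsC arr FC) U))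
              (PySem.Set.empty, [])).1
            ↔ j ∈ rem ∧ pvCondC arr FC (PySem.Set.diff (pvValsC arr FC) U) j = true) ∧
          (∀ j, j ∈ (rem.foldl (pvScanC arr FC (PySem.Set.diff (pvValsC arr FC) U))
              (PySem.Set.empty, [])).2
            ↔ j ∈ rem ∧ pvCondC arr FC (PySem.Set.diff (pvValsC arr FC) U) j = false) := by
        constructor <;> intro j
        · rw [(pv_scanC_mem arr FC _ rem (PySem.Set.empty, []) j).1]
          simp [PySem.Set.empty]
        · rw [(pv_scanC_mem arr FC _ rem (PySem.Set.empty, []) j).2]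
          simp
      have hnf : ∀ j, j ∈ (rem.foldl (pvScanC arr FC (PySem.Set.diff (pvValsC arr FC) U))
          (PySem.Set.empty, [])).1 ↔ j ∈ δ := by
        intro j
        rw [hsc1 j, hδ j, h4 j, hcondC j]
        tauto
      have hrest : ∀ j, j ∈ (rem.foldl (pvScanC arr FC (PySem.Set.diff (pvValsC arr FC) U))
          (PySem.Set.empty, [])).2
          ↔ (0 ≤ j ∧ j < (arr.length : Int) ∧ j ∉ vA ++ δ) := by
        intro j
        rw [hsc2 j, h4 j]
        constructor
        · rintro ⟨⟨ha, hb, hnv⟩, hc⟩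
          refine ⟨ha, hb, fun hin => ?_⟩
          rcases List.mem_append.mp hin with hv | hv
          · exact hnv hv
          · have := ((hδ j).mp hv).2.2.2
            have hct : pvCondC arr FC (PySem.Set.diff (pvValsC arr FC) U) j = true :=
              (hcondC j).mpr this
            rw [hc] at hct
            cases hct
        · rintro ⟨ha, hb, hnv⟩
          have hnvA : j ∉ vA := fun h => hnv (List.mem_append.mpr (Or.inl h))
          have hnδ : j ∉ δ := fun h => hnv (List.mem_append.mpr (Or.inr h))
          refine ⟨⟨ha, hb, hnvA⟩, ?_⟩
          by_cases hc : pvCondC arr FC (PySem.Set.diff (pvValsC arr FC) U) j = true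
          · exact absurd ((hδ j).mpr ⟨ha, hb, hnvA, (hcondC j).mp hc⟩) hnδ
          · simpa using hc
      -- the new frontier is nonempty
      obtain ⟨m, hmv, hmax⟩ := pv_exists_max vA (List.ne_nil_of_mem h9)
      obtain ⟨hm0, hm1⟩ := h10 m hmv
      have hmn : m ≠ (arr.length : Int) - 1 := by
        intro h
        exact hmem (h8 (h ▸ hmv))
      have hm1v : m + 1 ∉ vA := fun h => by have := hmax _ h; omega
      have hmL : m ∈ L := by
        by_contra hnot
        rcases h6 m hmv hnot with h | h
        · exact hm1v h
        · omega
      have hm1δ : m + 1 ∈ δ := by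
        refine (hδ _).mpr ⟨by omega, by omega, hm1v, Or.inr (Or.inl ?_)⟩
        have he : m + 1 - 1 = m := by ring
        rw [he]
        exact hmL
      have hδne : δ ≠ [] := List.ne_nil_of_mem hm1δ
      have hnfne : (rem.foldl (pvScanC arr FC (PySem.Set.diff (pvValsC arr FC) U))
          (PySem.Set.empty, [])).1 ≠ [] := List.ne_nil_of_mem ((hnf _).mpr hm1δ)
      -- unfold one round on both sides
      have hLstep : pvLoopB arr (f + 1) L st vA g
          = pvLoopB arr f δ (st + 1) (vA ++ δ) g' := by
        simp only [pvLoopB, if_neg hmem, hfold]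
        simp [hδne]
      have hCstep : pvLoopC arr (f + 1) FC rem U st
          = pvLoopC arr f
              (rem.foldl (pvScanC arr FC (PySem.Set.diff (pvValsC arr FC) U))
                (PySem.Set.empty, [])).1
              (rem.foldl (pvScanC arr FC (PySem.Set.diff (pvValsC arr FC) U))
                (PySem.Set.empty, [])).2
              (PySem.Set.update U (PySem.Set.diff (pvValsC arr FC) U)) (st + 1) := by
        simp only [pvLoopC]
        rw [if_neg hFCne, if_neg hmemC]
      rw [hLstep, hCstep]
      apply ih
      · intro j; exact (hnf j).symm
      · exact hδne
      · intro p hp; exact (hprop p hp).1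
      · intro j; exact hrest j
      · -- groups after the round vs the used-values set
        intro x
        rw [hmemg x]
        have hcond : (x ∈ U ∨ ∃ p ∈ L, PySem.List.pyGet? arr p = some x)
            ↔ x ∈ PySem.Set.update U (PySem.Set.diff (pvValsC arr FC) U) := by
          rw [PySem.Set.mem_update]
          constructor
          · rintro (h | h)
            · exact Or.inl h
            · by_cases hxU : x ∈ U
              · exact Or.inl hxU
              · exact Or.inr ((hvals x).mpr ⟨h, hxU⟩)
          · rintro (h | h)
            · exact Or.inl h
            · exact Or.inr ((hvals x).mp h).1
        exact if_congr hcond rfl rfl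
      · -- the closure invariant for the next round
        intro i hi hniδ
        have hivA : i ∈ vA := by
          rcases List.mem_append.mp hi with h | h
          · exact h
          · exact absurd h hniδ
        obtain ⟨hi0, hi1⟩ := h10 i hivA
        by_cases hiL : i ∈ L
        · by_cases hin : (arr.length : Int) ≤ i + 1
          · exact Or.inr hin
          · left
            by_cases hiv : i + 1 ∈ vA
            · exact List.mem_append.mpr (Or.inl hiv)
            · refine List.mem_append.mpr (Or.inr ((hδ _).mpr
                ⟨by omega, by omega, hiv, Or.inr (Or.inl ?_)⟩))
              have he : i + 1 - 1 = i := by ring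
              rw [he]
              exact hiL
        · rcases h6 i hivA hiL with h | h
          · exact Or.inl (List.mem_append.mpr (Or.inl h))
          · exact Or.inr h
      · intro p hp; exact List.mem_append.mpr (Or.inr hp)
      · intro h
        rcases List.mem_append.mp h with hv | hv
        · exact absurd (h8 hv) hmem
        · exact hv
      · exact List.mem_append.mpr (Or.inl h9)
      · intro i hi
        rcases List.mem_append.mp hi with hv | hv
        · exact h10 i hv
        · exact (hprop i hv).1

-- ===== VERDICT (by name: the statement is the Claim_ definition above) =====
theorem minJumps_kamyu_spec : Claim_equal_minJumps_kamyu := by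
  intro arr _ hpre
  unfold Spec_minJumps_kamyu minJumps_kamyu minJumps_kamyu_alt
  have hn : 1 ≤ arr.length := by
    cases arr with
    | nil => exact absurd rfl hpre
    | cons a l => simp
  have hv0 : PySem.Set.add PySem.Set.empty (0 : Int) = [0] := rfl
  have hU0 : pvU arr [(0 : Int)] = arr.length - 1 := by
    unfold pvU
    have he : (Finset.range arr.length).filter (fun i : Nat => (i : Int) ∉ [(0 : Int)])
        = (Finset.range arr.length).erase 0 := by
      ext i
      simp [Finset.mem_erase, and_comm, Int.natCast_eq_zero]
    rw [he, Finset.card_erase_of_mem (by simp; omega), Finset.card_range]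
  rw [hv0]
  have hmain := pv_main arr arr.length [0] arr.length [(0 : Int)] (pvGroupsA arr) 0 0
    (by simp) (by simp) (by simp [hU0]; omega) (by simp [hU0]; omega)
  have htag : pvTag 0 [(0 : Int)] = [((0 : Int), (0 : Int))] := rfl
  rw [← htag, hmain]
  apply pv_bisim arr arr.length [0] [0] [(0 : Int)] _ (pvGroupsA arr) PySem.Set.empty 0
  · intro j; rfl
  · simp
  · intro p hp; rcases List.mem_singleton.mp hp with rfl; constructor <;> omega
  · intro j
    rw [PySem.List.mem_pyRange_one]
    simp only [List.mem_singleton]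
    omega
  · intro x
    simp [pv_groupsA_getD]
  · intro i hi hL; exact absurd hi hL
  · intro p hp; exact hp
  · intro h; exact h
  · simp
  · intro i hi; rcases List.mem_singleton.mp hi with rfl; constructor <;> omega
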